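-- pv_equiv track=rewrite | github.com/RBaetens/table | tables.py | _split_idx_neg
-- ===== SOURCE A (Python) =====
-- def _split_idx_neg(idx, n_cols_list, n_arrs, n_cols):
--     """Splits index over all columns into an index over the list containing the different arrays and an index within one of those arrays.
--     Only works for negative indices, see _split_idx() for positive indices.
--
--     Args:
--         idx (int): index to be split
--         n_cols_list (list): list of integers containing the number of colums per array
--         n_arrs (int): the number of arrays
--         n_cols (int): the total number of columns
--
--     Returns:
--         int: index over list
--         int: index over array
--     """
--
--     if idx < -n_cols:
--         raise IndexError(f"Index {idx} is out of bound for data with total of {n_cols} columns.")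
--
--     list_idx = -1
--     arr_idx = -1
--     cols_passed_neg = -1
--
--     while idx < cols_passed_neg:
--         if arr_idx == -n_cols_list[list_idx]:
--             list_idx -= 1
--             arr_idx = -1
--         else:
--             arr_idx -= 1
--         cols_passed_neg -= 1
--
--     return list_idx, arr_idx
-- ===== SOURCE B (Python) =====
-- def _split_idx_neg(idx, n_cols_list, n_arrs, n_cols):
--     """Splits a (negative) global column index into (list index, in-array index)
--     by subtracting whole array widths from the end, one array per step, instead
--     of stepping column by column."""
--     if idx < -n_cols:
--         raise IndexError(f"Index {idx} is out of bound for data with total of {n_cols} columns.")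
--     list_idx = -1
--     t = max(-idx - 1, 0)      # columns still to step past, beyond the last one
--     while t > 0:
--         c = n_cols_list[list_idx]
--         if c < 1 or t < c:
--             break
--         t -= c
--         list_idx -= 1
--     return list_idx, -1 - t
-- ===== Notes on version B (the rewrite author's own statement) =====
-- stated objective: alternative
-- what changed: A steps one column at a time, maintaining arr_idx and cols_passed_neg per column; B instead subtracts a whole array's column count from the remaining step budget per loop iteration (one iteration per array, not per column).
import Mathlib
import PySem

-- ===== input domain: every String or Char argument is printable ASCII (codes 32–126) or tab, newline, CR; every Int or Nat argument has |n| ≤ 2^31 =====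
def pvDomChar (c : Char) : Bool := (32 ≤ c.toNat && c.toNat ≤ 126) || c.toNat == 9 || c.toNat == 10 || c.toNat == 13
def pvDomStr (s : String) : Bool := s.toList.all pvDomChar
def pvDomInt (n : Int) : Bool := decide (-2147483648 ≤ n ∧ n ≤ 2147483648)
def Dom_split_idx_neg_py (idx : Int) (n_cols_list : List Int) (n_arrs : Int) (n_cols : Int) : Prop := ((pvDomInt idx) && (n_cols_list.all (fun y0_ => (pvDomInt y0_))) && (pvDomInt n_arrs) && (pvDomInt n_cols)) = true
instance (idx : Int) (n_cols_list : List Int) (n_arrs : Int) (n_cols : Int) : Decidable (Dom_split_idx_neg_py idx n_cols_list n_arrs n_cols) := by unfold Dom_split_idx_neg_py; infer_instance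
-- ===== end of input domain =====

-- B replaces A's column-by-column countdown with one arithmetic jump per array: it subtracts each array's whole column count from the remaining step budget (alternative decomposition; same observed cost on the timed inputs).

-- ===== PORT A =====
-- A's while loop; the raise (idx < -n_cols) and the in-range list accesses are guaranteed by Pre_,
-- out-of-range pyGet? falls back to 0 there (never reached inside Pre_).
def splitLoopA (idx : Int) (ncl : List Int) (list_idx arr_idx cols_passed_neg : Int) : Int × Int :=
  if h : idx < cols_passed_neg then
    if arr_idx = -((PySem.List.pyGet? ncl list_idx).getD 0) then
      splitLoopA idx ncl (list_idx - 1) (-1) (cols_passed_neg - 1)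
    else
      splitLoopA idx ncl list_idx (arr_idx - 1) (cols_passed_neg - 1)
  else (list_idx, arr_idx)
termination_by (cols_passed_neg - idx).toNat
decreasing_by all_goals omega

def split_idx_neg_py (idx : Int) (n_cols_list : List Int) (n_arrs : Int) (n_cols : Int) : Int × Int :=
  splitLoopA idx n_cols_list (-1) (-1) (-1)

-- ===== PORT B =====
-- B's while loop: subtract whole array widths from the step budget t.
def splitLoopB (ncl : List Int) (list_idx t : Int) : Int × Int :=
  if h : 0 < t then
    let c := (PySem.List.pyGet? ncl list_idx).getD 0
    if hc : c < 1 ∨ t < c then (list_idx, -1 - t)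
    else splitLoopB ncl (list_idx - 1) (t - c)
  else (list_idx, -1 - t)
termination_by t.toNat
decreasing_by omega

def split_idx_neg_py_alt (idx : Int) (n_cols_list : List Int) (n_arrs : Int) (n_cols : Int) : Int × Int :=
  splitLoopB n_cols_list (-1) (max (-idx - 1) 0)

-- ===== PRECONDITION & SPEC =====
-- Pre_ excludes exactly the inputs where Python A raises IndexError: idx < -n_cols (the explicit raise),
-- and walks that run off the front of n_cols_list (all entries ≥ 1 and more than their sum of steps to take).
def Pre_split_idx_neg_py (idx : Int) (n_cols_list : List Int) (n_arrs : Int) (n_cols : Int) : Prop :=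
  -n_cols ≤ idx ∧ ¬((∀ e ∈ n_cols_list, 1 ≤ e) ∧ n_cols_list.sum < -idx - 1)
instance (idx : Int) (n_cols_list : List Int) (n_arrs : Int) (n_cols : Int) : Decidable (Pre_split_idx_neg_py idx n_cols_list n_arrs n_cols) := by unfold Pre_split_idx_neg_py; infer_instance

def pvWitness_split_idx_neg_py : Int × List Int × Int × Int := (-3, [2, 2], 2, 4)

def Spec_split_idx_neg_py (idx : Int) (n_cols_list : List Int) (n_arrs : Int) (n_cols : Int) (out : Int × Int) : Prop := out = split_idx_neg_py_alt idx n_cols_list n_arrs n_cols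
instance (idx : Int) (n_cols_list : List Int) (n_arrs : Int) (n_cols : Int) (out : Int × Int) : Decidable (Spec_split_idx_neg_py idx n_cols_list n_arrs n_cols out) := by unfold Spec_split_idx_neg_py; infer_instance

-- ===== CLAIM (what is proved, stated in full; the proofs are below) =====
def Claim_equal_split_idx_neg_py : Prop := ∀ (idx : Int) (n_cols_list : List Int) (n_arrs : Int) (n_cols : Int), Dom_split_idx_neg_py idx n_cols_list n_arrs n_cols → Pre_split_idx_neg_py idx n_cols_list n_arrs n_cols → Spec_split_idx_neg_py idx n_cols_list n_arrs n_cols (split_idx_neg_py idx n_cols_list n_arrs n_cols)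

-- ===== LEMMAS AND PROOFS =====

-- A's loop only depends on cols_passed_neg - idx.
theorem splitLoopA_shift (idx : Int) (ncl : List Int) (li ai cpn : Int) :
    splitLoopA idx ncl li ai cpn = splitLoopA 0 ncl li ai (cpn - idx) := by
  have key : ∀ n : Nat, ∀ li ai cpn : Int, (cpn - idx).toNat = n →
      splitLoopA idx ncl li ai cpn = splitLoopA 0 ncl li ai (cpn - idx) := by
    intro n
    induction n with
    | zero =>
      intro li ai cpn hn
      rw [splitLoopA, dif_neg (by omega : ¬ idx < cpn)]
      conv_rhs => rw [splitLoopA]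
      rw [dif_neg (by omega : ¬ (0:Int) < cpn - idx)]
    | succ n ih =>
      intro li ai cpn hn
      rw [splitLoopA, dif_pos (by omega : idx < cpn)]
      conv_rhs => rw [splitLoopA, dif_pos (by omega : (0:Int) < cpn - idx)]
      by_cases hc : ai = -((PySem.List.pyGet? ncl li).getD 0)
      · rw [if_pos hc, if_pos hc, ih (li - 1) (-1) (cpn - 1) (by omega),
          show cpn - 1 - idx = cpn - idx - 1 from by omega]
      · rw [if_neg hc, if_neg hc, ih li (ai - 1) (cpn - 1) (by omega),
          show cpn - 1 - idx = cpn - idx - 1 from by omega]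
  exact key (cpn - idx).toNat li ai cpn rfl

-- No transition during the t remaining steps: A just decrements arr_idx until the budget runs out.
theorem splitLoopA_run (ncl : List Int) (li : Int) : ∀ n : Nat, ∀ ai t : Int, t.toNat = n → 0 ≤ t →
    ai ≤ -1 → (t ≤ ai + (PySem.List.pyGet? ncl li).getD 0 ∨ ai + (PySem.List.pyGet? ncl li).getD 0 < 0) →
    splitLoopA 0 ncl li ai t = (li, ai - t) := by
  intro n
  induction n with
  | zero =>
    intro ai t hn ht hai _
    rw [splitLoopA, dif_neg (by omega : ¬ (0:Int) < t),
      show ai - t = ai from by omega]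
  | succ n ih =>
    intro ai t hn ht hai hav
    rw [splitLoopA, dif_pos (by omega : (0:Int) < t),
      if_neg (by omega : ¬ ai = -((PySem.List.pyGet? ncl li).getD 0)),
      ih (ai - 1) (t - 1) (by omega) (by omega) (by omega) (by omega),
      show ai - 1 - (t - 1) = ai - t from by omega]

-- Enough steps to finish the current array: after ai + c + 1 steps A stands at the previous array.
theorem splitLoopA_full (ncl : List Int) (li : Int) : ∀ n : Nat, ∀ ai t : Int, t.toNat = n →
    -((PySem.List.pyGet? ncl li).getD 0) ≤ ai → ai ≤ -1 →
    ai + (PySem.List.pyGet? ncl li).getD 0 + 1 ≤ t →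
    splitLoopA 0 ncl li ai t
      = splitLoopA 0 ncl (li - 1) (-1) (t - (ai + (PySem.List.pyGet? ncl li).getD 0) - 1) := by
  intro n
  induction n with
  | zero => intro ai t hn hlo hhi ht; omega
  | succ n ih =>
    intro ai t hn hlo hhi ht
    rw [splitLoopA, dif_pos (by omega : (0:Int) < t)]
    by_cases hc : ai = -((PySem.List.pyGet? ncl li).getD 0)
    · rw [if_pos hc,
        show t - (ai + (PySem.List.pyGet? ncl li).getD 0) - 1 = t - 1 from by omega]
    · rw [if_neg hc, ih (ai - 1) (t - 1) (by omega) (by omega) (by omega) (by omega),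
        show t - 1 - (ai - 1 + (PySem.List.pyGet? ncl li).getD 0) - 1
          = t - (ai + (PySem.List.pyGet? ncl li).getD 0) - 1 from by omega]

theorem splitLoopA_eq_B (ncl : List Int) (t : Int) (ht : 0 ≤ t) (li : Int) :
    splitLoopA 0 ncl li (-1) t = splitLoopB ncl li t := by
  have key : ∀ n : Nat, ∀ li t : Int, t.toNat = n → 0 ≤ t →
      splitLoopA 0 ncl li (-1) t = splitLoopB ncl li t := by
    intro n
    induction n using Nat.strong_induction_on with
    | _ n ih =>
      intro li t hn ht
      by_cases ht0 : (0:Int) < t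
      · rw [splitLoopB, dif_pos ht0]
        by_cases hc : (PySem.List.pyGet? ncl li).getD 0 < 1 ∨ t < (PySem.List.pyGet? ncl li).getD 0
        · rw [dif_pos hc, splitLoopA_run ncl li t.toNat (-1) t rfl ht (by omega) (by omega),
            show (-1 : Int) - t = -1 - t from rfl]
        · rw [dif_neg hc,
            splitLoopA_full ncl li t.toNat (-1) t rfl (by omega) (by omega) (by omega),
            show t - (-1 + (PySem.List.pyGet? ncl li).getD 0) - 1
              = t - (PySem.List.pyGet? ncl li).getD 0 from by omega]
          exact ih (t - (PySem.List.pyGet? ncl li).getD 0).toNat (by omega) (li - 1) _ rfl (by omega)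
      · rw [splitLoopA, dif_neg ht0, splitLoopB, dif_neg ht0,
          show (-1 : Int) - t = -1 from by omega]
  exact key t.toNat li t rfl ht

-- ===== VERDICT (by name: the statement is the Claim_ definition above) =====
theorem split_idx_neg_py_spec : Claim_equal_split_idx_neg_py := by
  intro idx ncl n_arrs n_cols _ _
  unfold Spec_split_idx_neg_py split_idx_neg_py split_idx_neg_py_alt
  rw [splitLoopA_shift]
  by_cases h : 0 ≤ idx
  · rw [show ((-1 : Int) - idx) = -1 - idx from rfl]
    rw [splitLoopA, splitLoopB]
    simp only [show ¬(0:Int) < -1 - idx by omega, show max (-idx - 1) 0 = 0 by omega]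
    norm_num
  · rw [show max (-idx - 1) 0 = -1 - idx by omega]
    exact splitLoopA_eq_B ncl (-1 - idx) (by omega) (-1)
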